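-- pv_equiv track=rewrite | github.com/denix372/proiectarea-algoritmilor | graphs/lab6/bfs+dfs/berarii2/berarii2.py | dfs_multisource
-- ===== SOURCE A (Python) =====
-- def dfs_multisource(N, edges, sources):
--     graph = [[] for _ in range(N + 1)]
--     for x, y in edges:
--         graph[y].append(x)   # inversam muchia
--     seen = [False] * N
--
--     def dfs(node):
--         seen[node] = True
--         for nxt in graph[node]:
--             if not seen[nxt]:
--                 dfs(nxt)
--
--     for s in sources:
--         if not seen[s]:
--             dfs(s)
--
--     result = []
--     for i in range(1, N ):
--         if not seen[i]:
--             result.append(i)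
--     return result
-- ===== SOURCE B (Python) =====
-- def dfs_multisource(N, edges, sources):
--     # Fixed-point relaxation: no adjacency list, no recursion -- one boolean
--     # table, swept over the raw edge list until a full sweep changes nothing.
--     reached = [False] * (N + 1)
--     for s in sources:
--         reached[s] = True
--     changed = True
--     while changed:
--         changed = False
--         for x, y in edges:
--             if reached[y] and not reached[x]:
--                 reached[x] = True
--                 changed = True
--     return [i for i in range(1, N) if not reached[i]]
-- ===== Notes on version B (the rewrite author's own statement) =====
-- stated objective: alternative
-- what changed: A builds a reversed adjacency list and marks a seen array by recursive DFS; B builds no graph and does not recurse: it grows one boolean table to a fixed point by repeatedly sweeping the raw edge list, marking a tail whose head is already marked until a full sweep changes nothing.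
-- outside the precondition, e.g. on dfs_multisource(3, [(-1, 1)], [1]): A returns [], B returns [2]
import Mathlib
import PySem

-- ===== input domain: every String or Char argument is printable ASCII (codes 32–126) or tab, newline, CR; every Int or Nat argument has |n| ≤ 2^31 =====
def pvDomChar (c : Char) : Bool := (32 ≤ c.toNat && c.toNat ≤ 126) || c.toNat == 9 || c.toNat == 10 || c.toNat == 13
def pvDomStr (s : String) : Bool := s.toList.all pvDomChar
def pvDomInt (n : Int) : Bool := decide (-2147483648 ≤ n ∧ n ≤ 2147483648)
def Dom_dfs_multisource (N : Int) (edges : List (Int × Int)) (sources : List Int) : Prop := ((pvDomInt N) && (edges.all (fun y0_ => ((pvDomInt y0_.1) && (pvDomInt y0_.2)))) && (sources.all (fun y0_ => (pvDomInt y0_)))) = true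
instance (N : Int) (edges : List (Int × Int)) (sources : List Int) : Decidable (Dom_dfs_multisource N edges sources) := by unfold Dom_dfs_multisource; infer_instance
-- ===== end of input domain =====

-- B drops A's adjacency list and recursive DFS entirely: it computes the same reachable set
-- as a fixed point of repeated relaxation sweeps over the raw edge list; objective: alternative.

-- ===== PORT A =====
-- graph = [[] for _ in range(N + 1)]; for x, y in edges: graph[y].append(x)
-- (pyGetD/pySetD are exact for the in-range indices Pre_ admits; Python raises IndexError outside)
def pvGraphA (N : Int) (edges : List (Int × Int)) : List (List Int) :=
  edges.foldl
    (fun g e => PySem.List.pySetD g e.2 (PySem.List.pyGetD g e.2 [] ++ [e.1]))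
    (List.replicate (N + 1).toNat ([] : List Int))

-- def dfs(node): seen[node] = True; for nxt in graph[node]: if not seen[nxt]: dfs(nxt)
-- fuel makes the recursion structural; fuel = N+1 is proven sufficient under Pre_
-- (Python's recursion depth is bounded by the number of unmarked nodes).
def pvDfsA (G : List (List Int)) : Nat → List Bool → Int → List Bool
  | 0, seen, _ => seen
  | f + 1, seen, node =>
    let seen1 := PySem.List.pySetD seen node true
    (PySem.List.pyGetD G node []).foldl
      (fun sn nxt => if PySem.List.pyGetD sn nxt false then sn else pvDfsA G f sn nxt) seen1

def dfs_multisource (N : Int) (edges : List (Int × Int)) (sources : List Int) : List Int :=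
  let graph := pvGraphA N edges
  let seen0 : List Bool := List.replicate N.toNat false   -- seen = [False] * N
  -- for s in sources: if not seen[s]: dfs(s)
  let seen := sources.foldl
    (fun sn s => if PySem.List.pyGetD sn s false then sn else pvDfsA graph (N.toNat + 1) sn s) seen0
  -- result = []; for i in range(1, N): if not seen[i]: result.append(i)
  (PySem.List.pyRange 1 N 1).foldl
    (fun res i => if PySem.List.pyGetD seen i false then res else res ++ [i]) []

-- ===== PORT B =====
-- changed = False; for x, y in edges: if reached[y] and not reached[x]: reached[x] = True; changed = True
-- (pyGetD/pySetD are exact for the in-range indices Pre_ admits; Python raises IndexError outside)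
def pvRelax (st : List Bool × Bool) (e : Int × Int) : List Bool × Bool :=
  if PySem.List.pyGetD st.1 e.2 false && !(PySem.List.pyGetD st.1 e.1 false)
  then (PySem.List.pySetD st.1 e.1 true, true) else st

def pvSweep (edges : List (Int × Int)) (st : List Bool × Bool) : List Bool × Bool :=
  edges.foldl pvRelax st

-- while changed: … — fuel makes the while loop structural; N + 2 sweeps are proven
-- sufficient under Pre_ (each changing sweep marks a fresh cell of the table).
def pvFix (edges : List (Int × Int)) : Nat → List Bool → List Bool
  | 0, r => r
  | f + 1, r =>
    let st := pvSweep edges (r, false)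
    if st.2 then pvFix edges f st.1 else st.1

def dfs_multisource_alt (N : Int) (edges : List (Int × Int)) (sources : List Int) : List Int :=
  -- reached = [False] * (N + 1); for s in sources: reached[s] = True
  let init := sources.foldl (fun r s => PySem.List.pySetD r s true)
    (List.replicate (N + 1).toNat false)
  let reached := pvFix edges ((N + 1).toNat + 1) init
  -- return [i for i in range(1, N) if not reached[i]]
  (PySem.List.pyRange 1 N 1).filter (fun i => !(PySem.List.pyGetD reached i false))

-- ===== PRECONDITION & SPEC =====
-- Pre_ admits the natural domain of in-range node labels (sources and edge tails in [0,N),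
-- edge heads in [0,N]) and, with no sources at all, any edges whose heads the list build
-- accepts: outside it A raises IndexError whenever building or traversing hits an
-- out-of-range label, or silently wraps a negative label — B, which never indexes, returns
-- the true reachability answer there instead, so those inputs stay outside the claim.
def Pre_dfs_multisource (N : Int) (edges : List (Int × Int)) (sources : List Int) : Prop :=
  (0 ≤ N ∧ (∀ e ∈ edges, 0 ≤ e.1 ∧ e.1 < N ∧ 0 ≤ e.2 ∧ e.2 ≤ N) ∧ (∀ s ∈ sources, 0 ≤ s ∧ s < N))
  ∨ (sources = [] ∧ ∀ e ∈ edges, -(N + 1) ≤ e.2 ∧ e.2 ≤ N)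
instance (N : Int) (edges : List (Int × Int)) (sources : List Int) : Decidable (Pre_dfs_multisource N edges sources) := by unfold Pre_dfs_multisource; infer_instance

def pvWitness_dfs_multisource : Int × (List (Int × Int)) × List Int := (4, [(1, 2), (3, 4)], [2])

def Spec_dfs_multisource (N : Int) (edges : List (Int × Int)) (sources : List Int) (out : List Int) : Prop := out = dfs_multisource_alt N edges sources
instance (N : Int) (edges : List (Int × Int)) (sources : List Int) (out : List Int) : Decidable (Spec_dfs_multisource N edges sources out) := by unfold Spec_dfs_multisource; infer_instance

-- ===== CLAIM (what is proved, stated in full; the proofs are below) =====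
def Claim_equal_dfs_multisource : Prop := ∀ (N : Int) (edges : List (Int × Int)) (sources : List Int), Dom_dfs_multisource N edges sources → Pre_dfs_multisource N edges sources → Spec_dfs_multisource N edges sources (dfs_multisource N edges sources)

-- ===== LEMMAS AND PROOFS =====

-- reachability from `sources` along reversed edges: the set both programs compute
inductive pvReach (edges : List (Int × Int)) (sources : List Int) : Int → Prop
  | src {s : Int} : s ∈ sources → pvReach edges sources s
  | step {x y : Int} : (x, y) ∈ edges → pvReach edges sources y → pvReach edges sources x

-- shorthand for A's seen-array lookup, and the count of unmarked cells (A's recursion measure)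
def gS (seen : List Bool) (i : Int) : Bool := PySem.List.pyGetD seen i false
def fcS (seen : List Bool) : Nat := seen.count false

-- reading a cell of a written array (both indices in range / nonnegative)
theorem pyGetD_oob {α : Type} (xs : List α) (j : Int) (hj : (xs.length : Int) ≤ j) (d : α) :
    PySem.List.pyGetD xs j d = d := by
  have h0 : (0:Int) ≤ j := le_trans (by positivity) hj
  simp only [PySem.List.pyGetD, PySem.List.pyGet?, PySem.List.pyIdx?, if_pos h0,
    if_neg (not_lt.mpr hj), Option.bind_none, Option.getD_none]

theorem pyGetD_pySetD_int {α : Type} (xs : List α) (i j : Int) (v d : α)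
    (hi0 : 0 ≤ i) (hi1 : i < xs.length) (hj0 : 0 ≤ j) :
    PySem.List.pyGetD (PySem.List.pySetD xs i v) j d = if j = i then v else PySem.List.pyGetD xs j d := by
  rw [PySem.List.pySetD_of_nonneg xs v hi0]
  by_cases hj1 : j < (xs.length : Int)
  · rw [PySem.List.pyGetD_eq_getElem _ _ hj0 (by simpa using hj1),
      PySem.List.pyGetD_eq_getElem _ _ hj0 (by simpa using hj1), List.getElem_set]
    by_cases h : j = i
    · subst h; simp
    · rw [if_neg (by omega), if_neg h]
  · have hne : j ≠ i := by omega
    rw [if_neg hne, pyGetD_oob _ _ (by simp only [List.length_set]; omega),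
      pyGetD_oob _ _ (by exact_mod_cast not_lt.mp hj1)]

theorem gS_pySetD (seen : List Bool) (i j : Int) (v : Bool)
    (hi0 : 0 ≤ i) (hi1 : i < seen.length) (hj0 : 0 ≤ j) :
    gS (PySem.List.pySetD seen i v) j = if j = i then v else gS seen j :=
  pyGetD_pySetD_int seen i j v false hi0 hi1 hj0

theorem pyGetD_replicate_self {α : Type} (n : Nat) (c : α) (i : Int) :
    PySem.List.pyGetD (List.replicate n c) i c = c := by
  by_cases h0 : 0 ≤ i
  · by_cases h1 : i < ((List.replicate n c).length : Int)
    · rw [PySem.List.pyGetD_eq_getElem _ _ h0 (by simpa using h1)]; simp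
    · exact pyGetD_oob _ _ (by omega) _
  · simp only [PySem.List.pyGetD, PySem.List.pyGet?, PySem.List.pyIdx?, if_neg h0]
    by_cases h2 : -(n : Int) ≤ i
    · simp only [List.length_replicate, if_pos h2]
      rcases Nat.lt_or_ge (n - (-i).toNat) n with h | h
      · simp [List.getElem?_replicate, h]
      · simp [List.getElem?_replicate, Nat.not_lt.mpr h]
    · simp only [List.length_replicate, if_neg h2]; rfl

theorem gS_replicate (n : Nat) (i : Int) : gS (List.replicate n false) i = false :=
  pyGetD_replicate_self n false i

theorem fcS_le_length (seen : List Bool) : fcS seen ≤ seen.length := List.count_le_length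

theorem fcS_pos (seen : List Bool) (node : Int) (h0 : 0 ≤ node) (h1 : node < seen.length)
    (hf : gS seen node = false) : 0 < fcS seen := by
  rw [gS, PySem.List.pyGetD_eq_getElem _ _ h0 (by simpa using h1)] at hf
  have : false ∈ seen := by
    rw [← hf]; exact List.getElem_mem _
  simpa [fcS, List.count_pos_iff] using this

theorem fcS_set_lt (seen : List Bool) (node : Int) (h0 : 0 ≤ node) (h1 : node < seen.length)
    (hf : gS seen node = false) : fcS (PySem.List.pySetD seen node true) < fcS seen := by
  rw [gS, PySem.List.pyGetD_eq_getElem _ _ h0 (by simpa using h1)] at hf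
  rw [PySem.List.pySetD_of_nonneg seen true h0]
  have hlt : node.toNat < seen.length := by omega
  have hsplit : seen.take node.toNat ++ seen[node.toNat] :: seen.drop (node.toNat + 1) = seen := by
    rw [List.getElem_cons_drop hlt]; exact List.take_append_drop _ _
  rw [List.set_eq_take_cons_drop true hlt, fcS, fcS]
  conv_rhs => rw [← hsplit]
  simp [List.count_append, hf]

theorem fcS_mono_nat (a b : List Bool) (hlen : a.length = b.length)
    (hmono : ∀ k : Nat, k < a.length → a[k]! = true → b[k]! = true) : fcS b ≤ fcS a := by
  induction a generalizing b with
  | nil => cases b with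
    | nil => exact le_rfl
    | cons y ys => simp at hlen
  | cons x xs ih => cases b with
    | nil => simp at hlen
    | cons y ys =>
      have hh := hmono 0 (by simp)
      have ht : ∀ k : Nat, k < xs.length → xs[k]! = true → ys[k]! = true := by
        intro k hk hx
        have := hmono (k+1) (by simpa using Nat.succ_lt_succ hk)
        simp only [List.getElem!_cons_succ] at this
        exact this hx
      have hrec := ih ys (by simpa using hlen) ht
      simp only [List.getElem!_cons_zero] at hh
      clear hmono ht ih
      cases x
      · cases y <;> simp_all [fcS] <;> omega
      · have hy : y = true := hh rfl
        subst hy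
        simp_all [fcS]

theorem fcS_mono (a b : List Bool) (hlen : a.length = b.length)
    (hmono : ∀ i : Int, 0 ≤ i → gS a i = true → gS b i = true) : fcS b ≤ fcS a := by
  refine fcS_mono_nat a b hlen (fun k hk ha => ?_)
  have h1 : gS a (k : Int) = true := by
    rw [gS, PySem.List.pyGetD_eq_getElem _ _ (by positivity) (by simpa using hk)]
    rw [List.getElem!_eq_getElem?_getD, List.getElem?_eq_getElem hk] at ha
    simpa using ha
  have h2 := hmono (k : Int) (by positivity) h1
  rw [gS, PySem.List.pyGetD_eq_getElem _ _ (by positivity) (by simp; omega)] at h2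
  rw [List.getElem!_eq_getElem?_getD, List.getElem?_eq_getElem (by omega)]
  simpa using h2

-- ===== A's reversed adjacency, characterised by the edge list =====

theorem pvGraphA_aux (N : Int) (l : List (Int × Int)) :
    ∀ (g : List (List Int)), (g.length : Int) = N + 1 →
    (∀ e ∈ l, 0 ≤ e.2 ∧ e.2 ≤ N) → ∀ u : Int, 0 ≤ u → u ≤ N →
    PySem.List.pyGetD (l.foldl (fun g e => PySem.List.pySetD g e.2 (PySem.List.pyGetD g e.2 [] ++ [e.1])) g) u []
      = PySem.List.pyGetD g u [] ++ (l.filter (fun e => e.2 == u)).map (·.1) := by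
  induction l with
  | nil => intro g hg he u hu0 hu1; simp
  | cons e rest ih =>
    intro g hg he u hu0 hu1
    have hee := he e (by simp)
    have hlen : ∀ (v : List Int), ((PySem.List.pySetD g e.2 v).length : Int) = N + 1 := by
      intro v; rw [PySem.List.length_pySetD]; exact hg
    rw [List.foldl_cons,
      ih _ (hlen _) (fun e' he' => he e' (List.mem_cons_of_mem _ he')) u hu0 hu1,
      pyGetD_pySetD_int g e.2 u _ [] hee.1 (by omega) hu0, List.filter_cons]
    by_cases h : u = e.2
    · subst h
      simp only [BEq.rfl, if_pos]
      simp [List.append_assoc]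
    · rw [if_neg h, if_neg (by simpa using Ne.symm h)]

theorem pvGraphA_getD (N : Int) (edges : List (Int × Int)) (hN : 0 ≤ N)
    (he : ∀ e ∈ edges, 0 ≤ e.2 ∧ e.2 ≤ N) (u : Int) (hu0 : 0 ≤ u) (hu1 : u ≤ N) :
    PySem.List.pyGetD (pvGraphA N edges) u [] = (edges.filter (fun e => e.2 == u)).map (·.1) := by
  rw [pvGraphA, pvGraphA_aux N edges _ (by simp; omega) he u hu0 hu1,
    pyGetD_replicate_self, List.nil_append]

theorem mem_filter_map_edges (edges : List (Int × Int)) (u x : Int) :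
    x ∈ (edges.filter (fun e => e.2 == u)).map (·.1) ↔ (x, u) ∈ edges := by
  constructor
  · intro h
    simp only [List.mem_map, List.mem_filter] at h
    obtain ⟨e, ⟨he, hb⟩, hx⟩ := h
    obtain ⟨a, b⟩ := e
    simp only [beq_iff_eq] at hb
    simp only at hx
    rw [← hx, ← hb]; exact he
  · intro h
    exact List.mem_map.mpr ⟨(x, u), List.mem_filter.mpr ⟨h, by simp⟩, rfl⟩

-- ===== A side: the recursive DFS marks exactly the reachable cells =====

def pvMono (a b : List Bool) : Prop := ∀ i : Int, 0 ≤ i → gS a i = true → gS b i = true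

-- newly marked cells have all their neighbours marked
def pvNewClosed (G : List (List Int)) (N : Int) (old new : List Bool) : Prop :=
  ∀ u x, 0 ≤ u → u < N → gS new u = true → gS old u = false →
    x ∈ PySem.List.pyGetD G u [] → gS new x = true

def pvDfsPres (G : List (List Int)) (N : Int) (f : Nat) : Prop :=
  ∀ seen node,
    (∀ u x, 0 ≤ u → u < N → x ∈ PySem.List.pyGetD G u [] → 0 ≤ x ∧ x < N) →
    (seen.length : Int) = N → 0 ≤ node → node < N → gS seen node = false → fcS seen ≤ f →
    (pvDfsA G f seen node).length = seen.length ∧ pvMono seen (pvDfsA G f seen node) ∧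
      gS (pvDfsA G f seen node) node = true ∧ pvNewClosed G N seen (pvDfsA G f seen node)

theorem pvLoopA_pres (G : List (List Int)) (N : Int) (f : Nat)
    (ihdfs : pvDfsPres G N f)
    (hadj : ∀ u x, 0 ≤ u → u < N → x ∈ PySem.List.pyGetD G u [] → 0 ≤ x ∧ x < N) :
    ∀ (l : List Int) (seen : List Bool), (seen.length : Int) = N →
    (∀ x ∈ l, 0 ≤ x ∧ x < N) → fcS seen ≤ f →
    (l.foldl (fun sn nxt => if PySem.List.pyGetD sn nxt false then sn else pvDfsA G f sn nxt) seen).length = seen.length ∧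
    pvMono seen (l.foldl (fun sn nxt => if PySem.List.pyGetD sn nxt false then sn else pvDfsA G f sn nxt) seen) ∧
    pvNewClosed G N seen (l.foldl (fun sn nxt => if PySem.List.pyGetD sn nxt false then sn else pvDfsA G f sn nxt) seen) ∧
    (∀ x ∈ l, gS (l.foldl (fun sn nxt => if PySem.List.pyGetD sn nxt false then sn else pvDfsA G f sn nxt) seen) x = true) := by
  intro l
  induction l with
  | nil =>
    intro seen hlen hl hfc
    refine ⟨rfl, fun i _ h => h, fun u x _ _ hnew hold _ => absurd hnew (by simp [hold]), by simp⟩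
  | cons nxt rest ih =>
    intro seen hlen hl hfc
    have hnxt := hl nxt (by simp)
    rw [List.foldl_cons]
    by_cases hg : PySem.List.pyGetD seen nxt false = true
    · rw [if_pos hg]
      obtain ⟨hLlen, hLmono, hLclosed, hLmark⟩ :=
        ih seen hlen (fun x hx => hl x (List.mem_cons_of_mem _ hx)) hfc
      refine ⟨hLlen, hLmono, hLclosed, fun x hx => ?_⟩
      rcases List.mem_cons.mp hx with hx | hx
      · subst hx; exact hLmono x hnxt.1 hg
      · exact hLmark x hx
    · rw [if_neg hg]
      have hgf : gS seen nxt = false := Bool.eq_false_iff.mpr hg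
      obtain ⟨hdlen, hdmono, hdmark, hdclosed⟩ :=
        ihdfs seen nxt hadj hlen hnxt.1 hnxt.2 hgf hfc
      have hfc1 : fcS (pvDfsA G f seen nxt) ≤ fcS seen :=
        fcS_mono seen (pvDfsA G f seen nxt) hdlen.symm hdmono
      obtain ⟨hLlen, hLmono, hLclosed, hLmark⟩ :=
        ih (pvDfsA G f seen nxt) (by rw [hdlen]; exact hlen)
          (fun x hx => hl x (List.mem_cons_of_mem _ hx)) (le_trans hfc1 hfc)
      refine ⟨hLlen.trans hdlen, fun i hi h => hLmono i hi (hdmono i hi h), ?_, fun x hx => ?_⟩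
      · intro u x hu0 hu1 hnew hold hx
        by_cases hmid : gS (pvDfsA G f seen nxt) u = true
        · exact hLmono x (hadj u x hu0 hu1 hx).1 (hdclosed u x hu0 hu1 hmid hold hx)
        · exact hLclosed u x hu0 hu1 hnew (Bool.eq_false_iff.mpr hmid) hx
      · rcases List.mem_cons.mp hx with hx | hx
        · subst hx; exact hLmono x hnxt.1 hdmark
        · exact hLmark x hx

theorem pvDfsA_pres (G : List (List Int)) (N : Int) (f : Nat) : pvDfsPres G N f := by
  induction f with
  | zero =>
    intro seen node hadj hlen h0 h1 hf hfc
    have := fcS_pos seen node h0 (by omega) hf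
    omega
  | succ f ih =>
    intro seen node hadj hlen h0 h1 hf hfc
    have h1l : node < (seen.length : Int) := by omega
    have hR : pvDfsA G (f + 1) seen node
        = (PySem.List.pyGetD G node []).foldl
            (fun sn nxt => if PySem.List.pyGetD sn nxt false then sn else pvDfsA G f sn nxt)
            (PySem.List.pySetD seen node true) := rfl
    have hlen1 : (PySem.List.pySetD seen node true).length = seen.length := by
      simp [PySem.List.length_pySetD]
    have hfc1 : fcS (PySem.List.pySetD seen node true) < fcS seen := fcS_set_lt seen node h0 h1l hf
    obtain ⟨hLlen, hLmono, hLclosed, hLmark⟩ :=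
      pvLoopA_pres G N f ih hadj (PySem.List.pyGetD G node []) (PySem.List.pySetD seen node true)
        (by rw [hlen1]; exact hlen) (fun x hx => hadj node x h0 h1 hx) (by omega)
    have hset : ∀ j : Int, 0 ≤ j →
        gS (PySem.List.pySetD seen node true) j = if j = node then true else gS seen j :=
      fun j hj => gS_pySetD seen node j true h0 h1l hj
    rw [hR]
    refine ⟨hLlen.trans hlen1, ?_, ?_, ?_⟩
    · intro i hi h
      refine hLmono i hi ?_
      rw [hset i hi]
      by_cases hin : i = node
      · simp [hin]
      · rw [if_neg hin]; exact h
    · exact hLmono node h0 (by rw [hset node h0, if_pos rfl])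
    · intro u x hu0 hu1 hnew hold hx
      by_cases hu : u = node
      · subst hu; exact hLmark x hx
      · refine hLclosed u x hu0 hu1 hnew ?_ hx
        rw [hset u hu0, if_neg hu]; exact hold

-- the source loop of A: same four facts, plus every source marked
theorem pvOuterA_pres (G : List (List Int)) (N : Int) (srcs : List Int) (seen : List Bool)
    (hadj : ∀ u x, 0 ≤ u → u < N → x ∈ PySem.List.pyGetD G u [] → 0 ≤ x ∧ x < N)
    (hlen : (seen.length : Int) = N) (hs : ∀ s ∈ srcs, 0 ≤ s ∧ s < N) :
    (srcs.foldl (fun sn s => if PySem.List.pyGetD sn s false then sn else pvDfsA G (N.toNat + 1) sn s) seen).length = seen.length ∧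
    pvMono seen (srcs.foldl (fun sn s => if PySem.List.pyGetD sn s false then sn else pvDfsA G (N.toNat + 1) sn s) seen) ∧
    pvNewClosed G N seen (srcs.foldl (fun sn s => if PySem.List.pyGetD sn s false then sn else pvDfsA G (N.toNat + 1) sn s) seen) ∧
    (∀ s ∈ srcs, gS (srcs.foldl (fun sn s => if PySem.List.pyGetD sn s false then sn else pvDfsA G (N.toNat + 1) sn s) seen) s = true) := by
  induction srcs generalizing seen with
  | nil =>
    refine ⟨rfl, fun i _ h => h, fun u x _ _ hnew hold _ => absurd hnew (by simp [hold]), by simp⟩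
  | cons s0 rest ih =>
    have hs0 := hs s0 (by simp)
    have hfc : fcS seen ≤ N.toNat + 1 := le_trans (fcS_le_length seen) (by omega)
    rw [List.foldl_cons]
    by_cases hg : PySem.List.pyGetD seen s0 false = true
    · rw [if_pos hg]
      obtain ⟨hLlen, hLmono, hLclosed, hLmark⟩ :=
        ih seen hlen (fun x hx => hs x (List.mem_cons_of_mem _ hx))
      refine ⟨hLlen, hLmono, hLclosed, fun x hx => ?_⟩
      rcases List.mem_cons.mp hx with hx | hx
      · subst hx; exact hLmono x hs0.1 hg
      · exact hLmark x hx
    · rw [if_neg hg]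
      have hgf : gS seen s0 = false := Bool.eq_false_iff.mpr hg
      obtain ⟨hdlen, hdmono, hdmark, hdclosed⟩ :=
        pvDfsA_pres G N (N.toNat + 1) seen s0 hadj hlen hs0.1 hs0.2 hgf hfc
      obtain ⟨hLlen, hLmono, hLclosed, hLmark⟩ :=
        ih (pvDfsA G (N.toNat + 1) seen s0) (by rw [hdlen]; exact hlen)
          (fun x hx => hs x (List.mem_cons_of_mem _ hx))
      refine ⟨hLlen.trans hdlen, fun i hi h => hLmono i hi (hdmono i hi h), ?_, fun x hx => ?_⟩
      · intro u x hu0 hu1 hnew hold hx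
        by_cases hmid : gS (pvDfsA G (N.toNat + 1) seen s0) u = true
        · exact hLmono x (hadj u x hu0 hu1 hx).1 (hdclosed u x hu0 hu1 hmid hold hx)
        · exact hLclosed u x hu0 hu1 hnew (Bool.eq_false_iff.mpr hmid) hx
      · rcases List.mem_cons.mp hx with hx | hx
        · subst hx; exact hLmono x hs0.1 hdmark
        · exact hLmark x hx

-- soundness: the DFS only marks reachable cells
theorem pvDfsA_sound (edges : List (Int × Int)) (sources : List Int) (G : List (List Int)) (N : Int)
    (hchar : ∀ u x, 0 ≤ u → u < N → (x ∈ PySem.List.pyGetD G u [] ↔ (x, u) ∈ edges))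
    (hadj : ∀ u x, 0 ≤ u → u < N → x ∈ PySem.List.pyGetD G u [] → 0 ≤ x ∧ x < N) :
    ∀ (f : Nat) (seen : List Bool) (node : Int), (seen.length : Int) = N → 0 ≤ node → node < N →
    pvReach edges sources node → (∀ i : Int, 0 ≤ i → gS seen i = true → pvReach edges sources i) →
    (pvDfsA G f seen node).length = seen.length ∧
    (∀ i : Int, 0 ≤ i → gS (pvDfsA G f seen node) i = true → pvReach edges sources i) := by
  intro f
  induction f with
  | zero => intro seen node hlen h0 h1 hr hinv; exact ⟨rfl, hinv⟩
  | succ f ih =>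
    intro seen node hlen h0 h1 hr hinv
    have h1l : node < (seen.length : Int) := by omega
    have hset := fun j hj => gS_pySetD seen node j true h0 h1l hj
    have hlen1 : (PySem.List.pySetD seen node true).length = seen.length := by
      simp [PySem.List.length_pySetD]
    have hinv1 : ∀ i : Int, 0 ≤ i → gS (PySem.List.pySetD seen node true) i = true →
        pvReach edges sources i := by
      intro i hi h
      rw [hset i hi] at h
      by_cases hin : i = node
      · subst hin; exact hr
      · rw [if_neg hin] at h; exact hinv i hi h
    have key : ∀ (l : List Int), (∀ x ∈ l, (0 ≤ x ∧ x < N) ∧ pvReach edges sources x) →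
        ∀ sn : List Bool, sn.length = seen.length →
        (∀ i : Int, 0 ≤ i → gS sn i = true → pvReach edges sources i) →
        (l.foldl (fun sn nxt => if PySem.List.pyGetD sn nxt false then sn else pvDfsA G f sn nxt) sn).length = seen.length ∧
        (∀ i : Int, 0 ≤ i →
          gS (l.foldl (fun sn nxt => if PySem.List.pyGetD sn nxt false then sn else pvDfsA G f sn nxt) sn) i = true →
          pvReach edges sources i) := by
      intro l
      induction l with
      | nil => intro _ sn hsl hsi; exact ⟨hsl, hsi⟩
      | cons nxt rest ihl =>
        intro hlr sn hsl hsi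
        have hn := hlr nxt (by simp)
        rw [List.foldl_cons]
        by_cases hg : PySem.List.pyGetD sn nxt false = true
        · rw [if_pos hg]
          exact ihl (fun x hx => hlr x (List.mem_cons_of_mem _ hx)) sn hsl hsi
        · rw [if_neg hg]
          obtain ⟨hdl, hdi⟩ := ih sn nxt (by rw [hsl]; exact hlen) hn.1.1 hn.1.2 hn.2 hsi
          exact ihl (fun x hx => hlr x (List.mem_cons_of_mem _ hx)) _ (hdl.trans hsl) hdi
    have hR : pvDfsA G (f + 1) seen node
        = (PySem.List.pyGetD G node []).foldl
            (fun sn nxt => if PySem.List.pyGetD sn nxt false then sn else pvDfsA G f sn nxt)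
            (PySem.List.pySetD seen node true) := rfl
    rw [hR]
    obtain ⟨hkl, hki⟩ := key (PySem.List.pyGetD G node [])
      (fun x hx => ⟨hadj node x h0 h1 hx, pvReach.step ((hchar node x h0 h1).mp hx) hr⟩)
      (PySem.List.pySetD seen node true) hlen1 hinv1
    exact ⟨hkl, hki⟩

-- A's final seen array, named for the lemmas
def pvSeenA (N : Int) (edges : List (Int × Int)) (sources : List Int) : List Bool :=
  sources.foldl
    (fun sn s => if PySem.List.pyGetD sn s false then sn else pvDfsA (pvGraphA N edges) (N.toNat + 1) sn s)
    (List.replicate N.toNat false)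

theorem pvReach_range (N : Int) (edges : List (Int × Int)) (sources : List Int)
    (hpre : 0 ≤ N ∧ (∀ e ∈ edges, 0 ≤ e.1 ∧ e.1 < N ∧ 0 ≤ e.2 ∧ e.2 ≤ N) ∧ (∀ s ∈ sources, 0 ≤ s ∧ s < N))
    (i : Int) (h : pvReach edges sources i) :
    0 ≤ i ∧ i < N := by
  induction h with
  | src hs => exact hpre.2.2 _ hs
  | step hxy hy ih =>
    have := hpre.2.1 _ hxy
    exact ⟨this.1, this.2.1⟩

theorem pvSeenA_char (N : Int) (edges : List (Int × Int)) (sources : List Int)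
    (hpre : 0 ≤ N ∧ (∀ e ∈ edges, 0 ≤ e.1 ∧ e.1 < N ∧ 0 ≤ e.2 ∧ e.2 ≤ N) ∧ (∀ s ∈ sources, 0 ≤ s ∧ s < N))
    (i : Int) (hi0 : 0 ≤ i) (_hi1 : i < N) :
    gS (pvSeenA N edges sources) i = true ↔ pvReach edges sources i := by
  obtain ⟨hN, hedge, hsrc⟩ := hpre
  have hchar : ∀ u x : Int, 0 ≤ u → u < N →
      (x ∈ PySem.List.pyGetD (pvGraphA N edges) u [] ↔ (x, u) ∈ edges) := by
    intro u x hu0 hu1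
    rw [pvGraphA_getD N edges hN (fun e he => ⟨(hedge e he).2.2.1, (hedge e he).2.2.2⟩) u hu0 (le_of_lt hu1)]
    exact mem_filter_map_edges edges u x
  have hadj : ∀ u x : Int, 0 ≤ u → u < N →
      x ∈ PySem.List.pyGetD (pvGraphA N edges) u [] → 0 ≤ x ∧ x < N := by
    intro u x hu0 hu1 hx
    have hm := (hchar u x hu0 hu1).mp hx
    exact ⟨(hedge _ hm).1, (hedge _ hm).2.1⟩
  have hlen0 : (((List.replicate N.toNat false).length : Nat) : Int) = N := by simp; omega
  obtain ⟨hOlen, hOmono, hOclosed, hOmark⟩ :=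
    pvOuterA_pres (pvGraphA N edges) N sources (List.replicate N.toNat false) hadj hlen0 hsrc
  have hseenA : pvSeenA N edges sources = sources.foldl
      (fun sn s => if PySem.List.pyGetD sn s false then sn else pvDfsA (pvGraphA N edges) (N.toNat + 1) sn s)
      (List.replicate N.toNat false) := rfl
  constructor
  · intro h
    have sound : ∀ (l : List Int), (∀ s ∈ l, 0 ≤ s ∧ s < N) → (∀ s ∈ l, s ∈ sources) →
        ∀ (sn : List Bool), ((sn.length : Nat) : Int) = N →
        (∀ j : Int, 0 ≤ j → gS sn j = true → pvReach edges sources j) →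
        (((l.foldl (fun sn s => if PySem.List.pyGetD sn s false then sn else pvDfsA (pvGraphA N edges) (N.toNat + 1) sn s) sn).length : Nat) : Int) = N ∧
        (∀ j : Int, 0 ≤ j → gS (l.foldl (fun sn s => if PySem.List.pyGetD sn s false then sn else pvDfsA (pvGraphA N edges) (N.toNat + 1) sn s) sn) j = true → pvReach edges sources j) := by
      intro l
      induction l with
      | nil => intro _ _ sn a b; exact ⟨a, b⟩
      | cons s0 rest ihl =>
        intro hl hls sn hsl hsi
        have hs0 := hl s0 (by simp)
        rw [List.foldl_cons]
        by_cases hg : PySem.List.pyGetD sn s0 false = true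
        · rw [if_pos hg]
          exact ihl (fun x hx => hl x (List.mem_cons_of_mem _ hx))
            (fun x hx => hls x (List.mem_cons_of_mem _ hx)) sn hsl hsi
        · rw [if_neg hg]
          obtain ⟨hdl, hdi⟩ := pvDfsA_sound edges sources (pvGraphA N edges) N hchar hadj
            (N.toNat + 1) sn s0 hsl hs0.1 hs0.2 (pvReach.src (hls s0 (by simp))) hsi
          exact ihl (fun x hx => hl x (List.mem_cons_of_mem _ hx))
            (fun x hx => hls x (List.mem_cons_of_mem _ hx)) _ (by rw [hdl]; exact hsl) hdi
    have h0inv : ∀ j : Int, 0 ≤ j → gS (List.replicate N.toNat false) j = true →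
        pvReach edges sources j := by
      intro j _ hj
      rw [gS_replicate] at hj
      exact absurd hj (by simp)
    rw [hseenA] at h
    exact (sound sources hsrc (fun s hx => hx) _ hlen0 h0inv).2 i hi0 h
  · intro hr
    have compl : ∀ j : Int, pvReach edges sources j → gS (pvSeenA N edges sources) j = true := by
      intro j hj
      induction hj with
      | src hs => rw [hseenA]; exact hOmark _ hs
      | @step x y hxy hy ihy =>
        have hyr := pvReach_range N edges sources ⟨hN, hedge, hsrc⟩ _ hy
        rw [hseenA]
        rw [hseenA] at ihy
        exact hOclosed _ _ hyr.1 hyr.2 ihy (gS_replicate _ _) ((hchar _ _ hyr.1 hyr.2).mpr hxy)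
    exact compl i hr

-- A's result loop is an append of the unmarked indices (loop shape, via PySem.List.foldl_append_if)
theorem pvResultEq (sn : List Bool) (l acc : List Int) :
    l.foldl (fun res i => if PySem.List.pyGetD sn i false then res else res ++ [i]) acc
      = acc ++ l.filter (fun i => !(PySem.List.pyGetD sn i false)) := by
  have hfun : (fun (res : List Int) (i : Int) =>
        if PySem.List.pyGetD sn i false then res else res ++ [i])
      = fun res i => if (fun j => !(PySem.List.pyGetD sn j false)) i = true then res ++ [id i] else res := by
    funext res i
    by_cases h : PySem.List.pyGetD sn i false = true
    · simp [h]
    · simp [Bool.eq_false_iff.mpr h]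
  rw [hfun, PySem.List.foldl_append_if, List.map_id]

-- ===== B side: the relaxation sweeps mark exactly the reachable cells =====

theorem pvRelax_eq (st : List Bool × Bool) (e : Int × Int) :
    pvRelax st e = if gS st.1 e.2 = true ∧ gS st.1 e.1 = false
      then (PySem.List.pySetD st.1 e.1 true, true) else st := by
  unfold pvRelax gS
  by_cases h2 : PySem.List.pyGetD st.1 e.2 false = true <;>
    by_cases h1 : PySem.List.pyGetD st.1 e.1 false = true <;>
    simp [h1, h2]

theorem pvSweep_nil (st : List Bool × Bool) : pvSweep [] st = st := rfl

theorem pvSweep_cons (e : Int × Int) (l : List (Int × Int)) (st : List Bool × Bool) :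
    pvSweep (e :: l) st = pvSweep l (pvRelax st e) := rfl

theorem pvSweep_len : ∀ (l : List (Int × Int)) (st : List Bool × Bool),
    (pvSweep l st).1.length = st.1.length := by
  intro l
  induction l with
  | nil => intro st; rfl
  | cons e rest ih =>
    intro st
    rw [pvSweep_cons, pvRelax_eq]
    split_ifs with h
    · rw [ih]; simp [PySem.List.length_pySetD]
    · exact ih st

-- a sweep only turns cells on
theorem pvSweep_mono (N : Int) (edges : List (Int × Int))
    (hedge : ∀ e ∈ edges, 0 ≤ e.1 ∧ e.1 < N ∧ 0 ≤ e.2 ∧ e.2 ≤ N) :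
    ∀ (l : List (Int × Int)), (∀ e ∈ l, e ∈ edges) →
    ∀ (st : List Bool × Bool), (st.1.length : Int) = N + 1 →
    ∀ j : Int, 0 ≤ j → gS st.1 j = true → gS (pvSweep l st).1 j = true := by
  intro l
  induction l with
  | nil => intro _ st _ j _ h; exact h
  | cons e rest ih =>
    intro hsub st hL j hj h
    have he := hedge e (hsub e (by simp))
    rw [pvSweep_cons, pvRelax_eq]
    split_ifs with hc
    · refine ih (fun e' he' => hsub e' (List.mem_cons_of_mem _ he'))
        _ (by simp [PySem.List.length_pySetD]; omega) j hj ?_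
      rw [gS_pySetD st.1 e.1 j true he.1 (by omega) hj]
      by_cases hje : j = e.1
      · simp [hje]
      · rw [if_neg hje]; exact h
    · exact ih (fun e' he' => hsub e' (List.mem_cons_of_mem _ he')) st hL j hj h

-- once the changed flag is set it stays set
theorem pvSweep_flag : ∀ (l : List (Int × Int)) (st : List Bool × Bool),
    st.2 = true → (pvSweep l st).2 = true := by
  intro l
  induction l with
  | nil => intro st h; exact h
  | cons e rest ih =>
    intro st h
    rw [pvSweep_cons, pvRelax_eq]
    split_ifs with hc
    · exact ih _ rfl
    · exact ih st h

-- a sweep only marks reachable cells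
theorem pvSweep_sound (N : Int) (edges : List (Int × Int)) (sources : List Int)
    (hedge : ∀ e ∈ edges, 0 ≤ e.1 ∧ e.1 < N ∧ 0 ≤ e.2 ∧ e.2 ≤ N) :
    ∀ (l : List (Int × Int)), (∀ e ∈ l, e ∈ edges) →
    ∀ (st : List Bool × Bool), (st.1.length : Int) = N + 1 →
    (∀ j : Int, 0 ≤ j → gS st.1 j = true → pvReach edges sources j) →
    ∀ j : Int, 0 ≤ j → gS (pvSweep l st).1 j = true → pvReach edges sources j := by
  intro l
  induction l with
  | nil => intro _ st _ h j hj hg; exact h j hj hg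
  | cons e rest ih =>
    intro hsub st hL hst
    have hee := hsub e (by simp)
    have he := hedge e hee
    refine ih (fun e' he' => hsub e' (List.mem_cons_of_mem _ he'))
      (pvRelax st e) ?_ ?_
    · rw [pvRelax_eq]
      split_ifs
      · simp [PySem.List.length_pySetD]; omega
      · exact hL
    · rw [pvRelax_eq]
      split_ifs with hc
      · intro j hj hg
        rw [gS_pySetD st.1 e.1 j true he.1 (by omega) hj] at hg
        by_cases hje : j = e.1
        · subst hje
          exact pvReach.step (by simpa using hee) (hst e.2 he.2.2.1 hc.1)
        · rw [if_neg hje] at hg; exact hst j hj hg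
      · exact hst

-- a sweep that reports no change changed nothing, and then the table is closed under every edge
theorem pvSweep_fix : ∀ (l : List (Int × Int)) (st : List Bool × Bool),
    (pvSweep l st).2 = false →
    (pvSweep l st).1 = st.1 ∧ (∀ e ∈ l, gS st.1 e.2 = true → gS st.1 e.1 = true) := by
  intro l
  induction l with
  | nil => intro st _; exact ⟨rfl, by simp⟩
  | cons e rest ih =>
    intro st hfix
    rw [pvSweep_cons, pvRelax_eq] at hfix ⊢
    split_ifs at hfix ⊢ with hc
    · simp [pvSweep_flag rest (PySem.List.pySetD st.1 e.1 true, true) rfl] at hfix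
    · obtain ⟨h1, h2⟩ := ih st hfix
      refine ⟨h1, fun e' he' hy => ?_⟩
      rcases List.mem_cons.mp he' with he' | he'
      · subst he'
        by_contra hx
        exact hc ⟨hy, Bool.eq_false_iff.mpr hx⟩
      · exact h2 e' he' hy

-- a sweep that reports a change strictly decreases the count of unmarked cells
theorem pvSweep_progress (N : Int) (edges : List (Int × Int))
    (hedge : ∀ e ∈ edges, 0 ≤ e.1 ∧ e.1 < N ∧ 0 ≤ e.2 ∧ e.2 ≤ N) :
    ∀ (l : List (Int × Int)), (∀ e ∈ l, e ∈ edges) →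
    ∀ (st : List Bool × Bool), (st.1.length : Int) = N + 1 → st.2 = false →
    (pvSweep l st).2 = true → fcS (pvSweep l st).1 < fcS st.1 := by
  intro l
  induction l with
  | nil =>
    intro _ st _ h0 hch
    rw [pvSweep_nil] at hch
    rw [h0] at hch
    cases hch
  | cons e rest ih =>
    intro hsub st hL h0 hch
    have he := hedge e (hsub e (by simp))
    rw [pvSweep_cons, pvRelax_eq] at hch ⊢
    split_ifs at hch ⊢ with hc
    · have hset : fcS (PySem.List.pySetD st.1 e.1 true) < fcS st.1 :=
        fcS_set_lt st.1 e.1 he.1 (by omega) hc.2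
      -- the rest of the sweep can only keep marking: fcS never grows back
      have hrest : fcS (pvSweep rest (PySem.List.pySetD st.1 e.1 true, true)).1
          ≤ fcS (PySem.List.pySetD st.1 e.1 true) := by
        refine fcS_mono _ _ (pvSweep_len rest (PySem.List.pySetD st.1 e.1 true, true)).symm ?_
        exact fun j hj hg => pvSweep_mono N edges hedge rest
          (fun e' he' => hsub e' (List.mem_cons_of_mem _ he'))
          _ (by simp [PySem.List.length_pySetD]; omega) j hj hg
      omega
    · exact ih (fun e' he' => hsub e' (List.mem_cons_of_mem _ he')) st hL h0 hch

-- the fixed-point loop: with enough fuel the result extends r, is sound, and is closed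
theorem pvFix_spec (N : Int) (edges : List (Int × Int)) (sources : List Int)
    (hedge : ∀ e ∈ edges, 0 ≤ e.1 ∧ e.1 < N ∧ 0 ≤ e.2 ∧ e.2 ≤ N) :
    ∀ (f : Nat) (r : List Bool), (r.length : Int) = N + 1 → fcS r < f →
    (∀ j : Int, 0 ≤ j → gS r j = true → pvReach edges sources j) →
    (∀ j : Int, 0 ≤ j → gS r j = true → gS (pvFix edges f r) j = true) ∧
    (∀ j : Int, 0 ≤ j → gS (pvFix edges f r) j = true → pvReach edges sources j) ∧
    (∀ e ∈ edges, gS (pvFix edges f r) e.2 = true → gS (pvFix edges f r) e.1 = true) := by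
  intro f
  induction f with
  | zero => intro r _ h _; omega
  | succ f ih =>
    intro r hL hfuel hsound
    have hR : pvFix edges (f + 1) r
        = if (pvSweep edges (r, false)).2 then pvFix edges f (pvSweep edges (r, false)).1
          else (pvSweep edges (r, false)).1 := rfl
    by_cases hch : (pvSweep edges (r, false)).2 = true
    · rw [hR, if_pos hch]
      have hlt : fcS (pvSweep edges (r, false)).1 < fcS r :=
        pvSweep_progress N edges hedge edges (fun e he => he) (r, false) hL rfl hch
      have hL1 : ((pvSweep edges (r, false)).1.length : Int) = N + 1 := by
        rw [pvSweep_len]; exact hL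
      have hsound1 := pvSweep_sound N edges sources hedge edges (fun e he => he) (r, false) hL hsound
      obtain ⟨h1, h2, h3⟩ := ih (pvSweep edges (r, false)).1 hL1 (by omega) hsound1
      exact ⟨fun j hj hg => h1 j hj
        (pvSweep_mono N edges hedge edges (fun e he => he) (r, false) hL j hj hg), h2, h3⟩
    · rw [hR, if_neg hch]
      obtain ⟨heq, hclosed⟩ := pvSweep_fix edges (r, false) (Bool.eq_false_iff.mpr hch)
      rw [heq]
      exact ⟨fun j _ hg => hg, hsound, hclosed⟩

-- the initial table marks exactly the sources
theorem pvInit_len (sources : List Int) (r : List Bool) :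
    (sources.foldl (fun r s => PySem.List.pySetD r s true) r).length = r.length := by
  induction sources generalizing r with
  | nil => rfl
  | cons s rest ih =>
    rw [List.foldl_cons, ih]
    simp [PySem.List.length_pySetD]

theorem pvInit_gS (N : Int) (sources : List Int)
    (hsrc : ∀ s ∈ sources, 0 ≤ s ∧ s < N) :
    ∀ (r : List Bool), (r.length : Int) = N + 1 → ∀ j : Int, 0 ≤ j →
    (gS (sources.foldl (fun r s => PySem.List.pySetD r s true) r) j = true ↔
      gS r j = true ∨ j ∈ sources) := by
  induction sources with
  | nil => intro r _ j _; simp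
  | cons s rest ih =>
    intro r hL j hj
    have hs := hsrc s (by simp)
    rw [List.foldl_cons,
      ih (fun x hx => hsrc x (List.mem_cons_of_mem _ hx)) _
        (by simp [PySem.List.length_pySetD]; omega) j hj,
      gS_pySetD r s j true hs.1 (by omega) hj]
    by_cases hjs : j = s
    · subst hjs; simp
    · rw [if_neg hjs]
      simp [hjs]

-- B's final table, named for the lemmas
def pvReachedB (N : Int) (edges : List (Int × Int)) (sources : List Int) : List Bool :=
  pvFix edges ((N + 1).toNat + 1)
    (sources.foldl (fun r s => PySem.List.pySetD r s true)
      (List.replicate (N + 1).toNat false))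

theorem pvReachedB_char (N : Int) (edges : List (Int × Int)) (sources : List Int)
    (hpre : 0 ≤ N ∧ (∀ e ∈ edges, 0 ≤ e.1 ∧ e.1 < N ∧ 0 ≤ e.2 ∧ e.2 ≤ N) ∧ (∀ s ∈ sources, 0 ≤ s ∧ s < N))
    (i : Int) (hi0 : 0 ≤ i) (_hi1 : i < N) :
    gS (pvReachedB N edges sources) i = true ↔ pvReach edges sources i := by
  obtain ⟨hN, hedge, hsrc⟩ := hpre
  have hL0 : ((List.replicate (N + 1).toNat false).length : Int) = N + 1 := by simp; omega
  have hLi : ((sources.foldl (fun r s => PySem.List.pySetD r s true)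
      (List.replicate (N + 1).toNat false)).length : Int) = N + 1 := by
    rw [pvInit_len]; exact hL0
  have hinit := pvInit_gS N sources hsrc (List.replicate (N + 1).toNat false) hL0
  have hfuel : fcS (sources.foldl (fun r s => PySem.List.pySetD r s true)
      (List.replicate (N + 1).toNat false)) < (N + 1).toNat + 1 := by
    have h1 := fcS_le_length (sources.foldl (fun r s => PySem.List.pySetD r s true)
      (List.replicate (N + 1).toNat false))
    omega
  have hsound0 : ∀ j : Int, 0 ≤ j →
      gS (sources.foldl (fun r s => PySem.List.pySetD r s true)
        (List.replicate (N + 1).toNat false)) j = true → pvReach edges sources j := by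
    intro j hj hg
    rcases (hinit j hj).mp hg with hg | hg
    · rw [gS_replicate] at hg; cases hg
    · exact pvReach.src hg
  obtain ⟨h1, h2, h3⟩ := pvFix_spec N edges sources hedge ((N + 1).toNat + 1)
    (sources.foldl (fun r s => PySem.List.pySetD r s true)
      (List.replicate (N + 1).toNat false)) hLi hfuel hsound0
  constructor
  · exact h2 i hi0
  · intro hr
    have compl : ∀ j : Int, pvReach edges sources j →
        gS (pvReachedB N edges sources) j = true := by
      intro j hj
      induction hj with
      | @src s hs =>
        have hsr := hsrc s hs
        exact h1 s hsr.1 ((hinit s hsr.1).mpr (Or.inr hs))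
      | @step x y hxy _ ihy => exact h3 _ hxy ihy
    exact compl i hr

-- with no sources the sweep never fires: the table stays all-false
theorem pvSweep_allfalse (l : List (Int × Int)) (r : List Bool)
    (hfalse : ∀ j : Int, gS r j = false) : pvSweep l (r, false) = (r, false) := by
  induction l with
  | nil => rfl
  | cons e rest ih =>
    rw [pvSweep_cons, pvRelax_eq]
    rw [if_neg (by rw [hfalse e.2]; simp)]
    exact ih

-- ===== assembly =====

theorem pvFix_succ (edges : List (Int × Int)) (f : Nat) (r : List Bool) :
    pvFix edges (f + 1) r
      = if (pvSweep edges (r, false)).2 then pvFix edges f (pvSweep edges (r, false)).1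
        else (pvSweep edges (r, false)).1 := rfl

theorem pv_main (N : Int) (edges : List (Int × Int)) (sources : List Int)
    (hpre : Pre_dfs_multisource N edges sources) :
    dfs_multisource N edges sources = dfs_multisource_alt N edges sources := by
  have hA : dfs_multisource N edges sources
      = (PySem.List.pyRange 1 N 1).foldl
          (fun res i => if PySem.List.pyGetD (pvSeenA N edges sources) i false then res else res ++ [i]) [] := rfl
  have hB : dfs_multisource_alt N edges sources
      = (PySem.List.pyRange 1 N 1).filter
          (fun i => !(PySem.List.pyGetD (pvReachedB N edges sources) i false)) := rfl
  rw [hA, hB, pvResultEq, List.nil_append]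
  refine List.filter_congr ?_
  intro i hi
  have hmem := (PySem.List.mem_pyRange_one).mp hi
  have hbool : gS (pvSeenA N edges sources) i = gS (pvReachedB N edges sources) i := by
    rcases hpre with hpre | ⟨hsrc, _⟩
    · have hiff : gS (pvSeenA N edges sources) i = true
          ↔ gS (pvReachedB N edges sources) i = true :=
        (pvSeenA_char N edges sources hpre i (by omega) hmem.2).trans
          (pvReachedB_char N edges sources hpre i (by omega) hmem.2).symm
      cases h1 : gS (pvSeenA N edges sources) i
      · cases h2 : gS (pvReachedB N edges sources) i
        · rfl
        · rw [h1] at hiff; exact absurd (hiff.mpr h2) (by simp)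
      · rw [h1] at hiff; exact (hiff.mp rfl).symm
    · subst hsrc
      have hfixr : pvReachedB N edges [] = List.replicate (N + 1).toNat false := by
        unfold pvReachedB
        rw [List.foldl_nil, pvFix_succ,
          pvSweep_allfalse edges _ (fun j => gS_replicate _ _)]
        rfl
      have h1 : gS (pvSeenA N edges []) i = false := gS_replicate _ _
      have h2 : gS (pvReachedB N edges []) i = false := by
        rw [hfixr]; exact gS_replicate _ _
      rw [h1, h2]
  simp only [gS] at hbool
  rw [hbool]

-- ===== VERDICT (by name: the statement is the Claim_ definition above) =====
theorem dfs_multisource_spec : Claim_equal_dfs_multisource := by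
  intro N edges sources _ hpre
  unfold Spec_dfs_multisource
  exact pv_main N edges sources hpre
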